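-- pv_equiv track=rewrite | github.com/umesh-thatikonda/interview-prep-ds-ae | mission-anthropic-de/python-de/bank/07_session_detection.py | stitch_sessions
-- ===== SOURCE A (Python) =====
-- def stitch_sessions(device_sessions, identity_links):
--     parent = {}
--
--     def find(x):
--         parent.setdefault(x, x)
--         while parent[x] != x:
--             parent[x] = parent[parent[x]]
--             x = parent[x]
--         return x
--
--     def union(a, b):
--         ra, rb = find(a), find(b)
--         if ra != rb:
--             # Keep lexicographically smaller as root
--             if ra < rb:
--                 parent[rb] = ra
--             else:
--                 parent[ra] = rb
--
--     for dev in device_sessions: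
--         find(dev["device_id"])
--
--     for a, b in identity_links:
--         union(a, b)
--
--     result = []
--     for s in device_sessions:
--         canonical = find(s["device_id"])
--         result.append({
--             "session_id": s["session_id"],
--             "device_id": s["device_id"],
--             "canonical_id": canonical,
--         })
--     return result
-- ===== SOURCE B (Python) =====
-- def stitch_sessions(device_sessions, identity_links):
--     # Label-flooding: flat node->canonical-label map, no union-find trees.
--     label = {}
--     for a, b in identity_links:
--         la = label.get(a, a)
--         lb = label.get(b, b)
--         lo, hi = (la, lb) if la <= lb else (lb, la)
--         label = {k: (lo if v == hi else v) for k, v in label.items()}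
--         label[a] = lo
--         label[b] = lo
--     return [{"session_id": s["session_id"], "device_id": s["device_id"],
--              "canonical_id": label.get(s["device_id"], s["device_id"])}
--             for s in device_sessions]
-- ===== Notes on version B (the rewrite author's own statement) =====
-- stated objective: alternative
-- what changed: Replaces A's union-find (parent-pointer forest with path halving and union-by-smaller-id) by a single flat node-to-canonical-label dict: each link repaints every occurrence of the larger of the two current labels to the smaller one, and the result is a plain lookup per session.
-- outside the precondition, e.g. on stitch_sessions([{'session_id': 's1'}], []): A raises KeyError, B raises KeyError
import Mathlib
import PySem

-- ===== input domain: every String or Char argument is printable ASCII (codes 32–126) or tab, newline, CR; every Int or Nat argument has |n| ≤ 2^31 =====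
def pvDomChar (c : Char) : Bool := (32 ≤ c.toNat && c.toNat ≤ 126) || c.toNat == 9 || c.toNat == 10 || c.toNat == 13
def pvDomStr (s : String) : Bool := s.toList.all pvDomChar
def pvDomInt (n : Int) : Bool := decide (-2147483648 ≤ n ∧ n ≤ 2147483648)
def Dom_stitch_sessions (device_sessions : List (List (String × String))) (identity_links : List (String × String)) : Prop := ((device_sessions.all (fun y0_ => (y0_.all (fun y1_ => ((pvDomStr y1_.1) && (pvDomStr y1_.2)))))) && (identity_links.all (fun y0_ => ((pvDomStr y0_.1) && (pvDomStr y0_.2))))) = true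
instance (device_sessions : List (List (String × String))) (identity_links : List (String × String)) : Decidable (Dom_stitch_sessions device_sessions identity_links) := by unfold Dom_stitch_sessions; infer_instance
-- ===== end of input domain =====

-- B replaces A's union-find (path-halving trees, union-by-smaller-id) by a flat label-flooding map:
-- one node→canonical-label dict, each link repaints the larger of the two current labels to the smaller;
-- objective: alternative (genuinely different data structure, similar cost on these inputs).

-- Shared tiny helpers: Python's `<` on str (lexicographic by code point; exact — ported by hand
-- because Lean's own String order does not reduce), and `d[k]` on a session dict.
def ltCh : List Char → List Char → Bool
  | _, [] => false
  | [], _ :: _ => true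
  | a :: as, b :: bs => a.toNat < b.toNat || (a.toNat == b.toNat && ltCh as bs)

def strLt (a b : String) : Bool := ltCh a.toList b.toList

def strLe (a b : String) : Bool := !(strLt b a)

-- s[k] for a session dict; Pre_ guarantees the key is present, so the default is never returned.
def sGet (s : List (String × String)) (k : String) : String :=
  ((PySem.Dict.mk s).get? k).getD ""

-- ===== PORT A =====
-- A's `find` loop (path halving).  Python's `while` is ported with fuel `size+1`: under the
-- invariant parent[x] ≤ x the chain from x strictly decreases inside the key set, so the loop
-- makes at most `size` iterations (proved below in findLoopA_spec); `parent[x]` is ported as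
-- getD x x — the key is always present when A runs (setdefault precedes the loop).
def findLoopA (fuel : Nat) (parent : PySem.Dict String String) (x : String) :
    PySem.Dict String String × String :=
  match fuel with
  | 0 => (parent, x)
  | f + 1 =>
    let y := parent.getD x x
    if y = x then (parent, x)
    else findLoopA f (parent.insert x (parent.getD y y)) (parent.getD y y)

def findA (parent : PySem.Dict String String) (x : String) :
    PySem.Dict String String × String :=
  let p := parent.setdefault x x
  findLoopA (p.size + 1) p x

def unionA (parent : PySem.Dict String String) (a b : String) : PySem.Dict String String :=
  let fa := findA parent a
  let fb := findA fa.1 b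
  if fa.2 ≠ fb.2 then
    (if strLt fa.2 fb.2 then fb.1.insert fb.2 fa.2 else fb.1.insert fa.2 fb.2)
  else fb.1

def stitch_sessions (device_sessions : List (List (String × String))) (identity_links : List (String × String)) : List (List (String × String)) :=
  let p0 : PySem.Dict String String :=
    device_sessions.foldl (fun p s => (findA p (sGet s "device_id")).1) PySem.Dict.empty
  let p1 := identity_links.foldl (fun p ab => unionA p ab.1 ab.2) p0
  (device_sessions.foldl
    (fun (st : PySem.Dict String String × List (List (String × String))) s =>
      let fr := findA st.1 (sGet s "device_id")
      (fr.1, st.2 ++ [[("session_id", sGet s "session_id"), ("device_id", sGet s "device_id"),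
                       ("canonical_id", fr.2)]]))
    (p1, [])).2

-- ===== PORT B =====
-- One link step of label flooding: repaint every label equal to the larger of the two current
-- labels to the smaller one (dict comprehension = rebuild of the items list), then set both ends.
def stepB (label : PySem.Dict String String) (a b : String) : PySem.Dict String String :=
  let la := label.getD a a
  let lb := label.getD b b
  let lo := if strLe la lb then la else lb
  let hi := if strLe la lb then lb else la
  ((PySem.Dict.mk (label.items.map (fun kv => (kv.1, if kv.2 = hi then lo else kv.2)))).insert a lo).insert b lo

def stitch_sessions_alt (device_sessions : List (List (String × String))) (identity_links : List (String × String)) : List (List (String × String)) :=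
  let label := identity_links.foldl (fun l ab => stepB l ab.1 ab.2) PySem.Dict.empty
  device_sessions.map (fun s =>
    [("session_id", sGet s "session_id"), ("device_id", sGet s "device_id"),
     ("canonical_id", label.getD (sGet s "device_id") (sGet s "device_id"))])

-- ===== PRECONDITION & SPEC =====
-- Pre_ excludes exactly the sessions missing a "session_id" or "device_id" key, on which the
-- Python A raises KeyError.
def Pre_stitch_sessions (device_sessions : List (List (String × String))) (identity_links : List (String × String)) : Prop :=
  ∀ s ∈ device_sessions, "session_id" ∈ s.map Prod.fst ∧ "device_id" ∈ s.map Prod.fst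

instance (device_sessions : List (List (String × String))) (identity_links : List (String × String)) : Decidable (Pre_stitch_sessions device_sessions identity_links) := by unfold Pre_stitch_sessions; infer_instance

def pvWitness_stitch_sessions : (List (List (String × String))) × (List (String × String)) :=
  ([[("session_id", "s1"), ("device_id", "d2")], [("session_id", "s2"), ("device_id", "d3")]],
   [("d2", "d3")])

def Spec_stitch_sessions (device_sessions : List (List (String × String))) (identity_links : List (String × String)) (out : List (List (String × String))) : Prop := out = stitch_sessions_alt device_sessions identity_links
instance (device_sessions : List (List (String × String))) (identity_links : List (String × String)) (out : List (List (String × String))) : Decidable (Spec_stitch_sessions device_sessions identity_links out) := by unfold Spec_stitch_sessions; infer_instance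

-- ===== CLAIM (what is proved, stated in full; the proofs are below) =====
def Claim_equal_stitch_sessions : Prop := ∀ (device_sessions : List (List (String × String))) (identity_links : List (String × String)), Dom_stitch_sessions device_sessions identity_links → Pre_stitch_sessions device_sessions identity_links → Spec_stitch_sessions device_sessions identity_links (stitch_sessions device_sessions identity_links)

-- ===== LEMMAS AND PROOFS =====

-- ---- the string order ----
theorem ltCh_irrefl (a : List Char) : ltCh a a = false := by
  induction a with
  | nil => rfl
  | cons c cs ih => simp [ltCh, ih]

theorem ltCh_trans {a b c : List Char} (h1 : ltCh a b = true) (h2 : ltCh b c = true) :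
    ltCh a c = true := by
  induction a generalizing b c with
  | nil =>
    cases b with
    | nil => simp [ltCh] at h1
    | cons y ys =>
      cases c with
      | nil => simp [ltCh] at h2
      | cons z zs => simp [ltCh]
  | cons x xs ih =>
    cases b with
    | nil => simp [ltCh] at h1
    | cons y ys =>
      cases c with
      | nil => simp [ltCh] at h2
      | cons z zs =>
        simp [ltCh] at h1 h2 ⊢
        rcases h1 with h1 | ⟨he1, h1⟩ <;> rcases h2 with h2 | ⟨he2, h2⟩
        · left; omega
        · left; omega
        · left; omega
        · right; exact ⟨by omega, ih h1 h2⟩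

theorem ltCh_conn {a b : List Char} (h1 : ltCh a b = false) (h2 : ltCh b a = false) : a = b := by
  induction a generalizing b with
  | nil =>
    cases b with
    | nil => rfl
    | cons y ys => simp [ltCh] at h1
  | cons x xs ih =>
    cases b with
    | nil => simp [ltCh] at h2
    | cons y ys =>
      simp [ltCh] at h1 h2
      obtain ⟨h1a, h1b⟩ := h1
      obtain ⟨h2a, h2b⟩ := h2
      have hn : x.toNat = y.toNat := by omega
      have hxy : x = y := Char.ext (UInt32.toNat_inj.mp hn)
      subst hxy
      simp [ih (h1b rfl) (h2b rfl)]

theorem strLt_asymm {a b : String} (h : strLt a b = true) : strLt b a = false := by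
  unfold strLt at *
  by_contra hc
  have h2 : ltCh b.toList a.toList = true := by
    cases hx : ltCh b.toList a.toList
    · exact absurd hx hc
    · rfl
  have := ltCh_trans h h2
  rw [ltCh_irrefl] at this
  exact Bool.noConfusion this

theorem strLt_conn {a b : String} (h1 : strLt a b = false) (h2 : strLt b a = false) : a = b := by
  unfold strLt at *
  exact String.toList_inj.mp (ltCh_conn h1 h2)

theorem strLe_refl (a : String) : strLe a a = true := by
  unfold strLe strLt; simp [ltCh_irrefl]

theorem strLe_of_strLt {a b : String} (h : strLt a b = true) : strLe a b = true := by
  unfold strLe; simp [strLt_asymm h]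

theorem strLt_of_strLe_of_ne {a b : String} (h : strLe a b = true) (hne : a ≠ b) :
    strLt a b = true := by
  unfold strLe at h
  cases hx : strLt a b
  · exact absurd (strLt_conn hx (by simpa using h)) hne
  · rfl

theorem strLt_trans {a b c : String} (h1 : strLt a b = true) (h2 : strLt b c = true) :
    strLt a c = true := by
  unfold strLt at *
  exact ltCh_trans h1 h2

theorem strLe_trans {a b c : String} (h1 : strLe a b = true) (h2 : strLe b c = true) :
    strLe a c = true := by
  unfold strLe at *
  simp only [Bool.not_eq_true'] at h1 h2 ⊢
  cases hx : strLt c a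
  · rfl
  · exfalso
    by_cases hab : a = b
    · subst hab; rw [hx] at h2; exact Bool.noConfusion h2
    · have hab' : strLt a b = true := strLt_of_strLe_of_ne (by simp [strLe, h1]) hab
      have hcb : strLt c b = true := strLt_trans hx hab'
      rw [hcb] at h2
      exact Bool.noConfusion h2

theorem ne_of_strLt {a b : String} (h : strLt a b = true) : a ≠ b := by
  intro he; subst he
  unfold strLt at h; rw [ltCh_irrefl] at h; exact Bool.noConfusion h

theorem strLt_total {a b : String} (hne : a ≠ b) : strLt a b = true ∨ strLt b a = true := by
  cases h1 : strLt a b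
  · cases h2 : strLt b a
    · exact absurd (strLt_conn h1 h2) hne
    · right; rfl
  · left; rfl

-- ---- the parent forest: root, measure, invariant ----
def rootN : Nat → PySem.Dict String String → String → String
  | 0, _, x => x
  | f + 1, p, x =>
    match p.get? x with
    | none => x
    | some y => if y = x then x else rootN f p y

def root (p : PySem.Dict String String) (x : String) : String := rootN (p.size + 1) p x

def mu (p : PySem.Dict String String) (x : String) : Nat :=
  (p.keys.filter (fun k => strLe k x)).length

def PInv (p : PySem.Dict String String) : Prop :=
  p.keys.Nodup ∧ ∀ k v, p.get? k = some v → strLe v k = true ∧ p.contains v = true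

theorem keys_length (p : PySem.Dict String String) : p.keys.length = p.size := by
  simp [PySem.Dict.keys, PySem.Dict.size]

theorem mem_keys_of_get? {p : PySem.Dict String String} {k v : String}
    (h : p.get? k = some v) : k ∈ p.keys :=
  PySem.Dict.mem_keys_of_mem_items p (PySem.Dict.mem_items_of_get?_eq_some p h)

theorem get?_eq_some_of_mem_keys {p : PySem.Dict String String} {k : String}
    (h : k ∈ p.keys) : ∃ v, p.get? k = some v := by
  cases hx : p.get? k with
  | none => exact absurd ((PySem.Dict.get?_eq_none_iff_not_mem_keys p k).mp hx) (by simp [h])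
  | some v => exact ⟨v, rfl⟩

theorem contains_iff_mem_keys' (p : PySem.Dict String String) (k : String) :
    p.contains k = true ↔ k ∈ p.keys := by
  rw [PySem.Dict.contains_eq_decide_mem_keys]; simp

theorem mu_pos {p : PySem.Dict String String} {x : String} (h : x ∈ p.keys) : 1 ≤ mu p x := by
  unfold mu
  have : x ∈ p.keys.filter (fun k => strLe k x) := by
    simp [List.mem_filter, h, strLe_refl]
  calc 1 ≤ 1 := le_refl 1
  _ ≤ (p.keys.filter (fun k => strLe k x)).length := List.length_pos_of_mem this

theorem mu_congr_keys {p q : PySem.Dict String String} (h : q.keys = p.keys) (x : String) :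
    mu q x = mu p x := by unfold mu; rw [h]

theorem mu_mono {p : PySem.Dict String String} {y x : String} (h : strLe y x = true) :
    mu p y ≤ mu p x := by
  unfold mu
  exact List.Sublist.length_le
    (List.monotone_filter_right _ (fun a ha => strLe_trans ha h))

theorem mu_lt_of_lt {p : PySem.Dict String String} {y x : String}
    (_hy : y ∈ p.keys) (hx : x ∈ p.keys) (h : strLt y x = true) : mu p y < mu p x := by
  have hle : mu p y ≤ mu p x := mu_mono (strLe_of_strLt h)
  rcases Nat.lt_or_ge (mu p y) (mu p x) with h' | h'
  · exact h'
  · exfalso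
    have heq : mu p y = mu p x := le_antisymm hle h'
    have hsub : (p.keys.filter (fun k => strLe k y)).Sublist (p.keys.filter (fun k => strLe k x)) :=
      List.monotone_filter_right _ (fun a ha => strLe_trans ha (strLe_of_strLt h))
    have hlists := hsub.eq_of_length heq
    have hxin : x ∈ p.keys.filter (fun k => strLe k x) := by
      simp [List.mem_filter, hx, strLe_refl]
    rw [← hlists] at hxin
    have : strLe x y = true := (List.mem_filter.mp hxin).2
    unfold strLe at this
    rw [h] at this
    exact Bool.noConfusion this

theorem mu_lt {p : PySem.Dict String String} (hInv : PInv p) {x y : String}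
    (h : p.get? x = some y) (hne : y ≠ x) : mu p y < mu p x := by
  have h1 := (hInv.2 x y h).1
  have h2 := (hInv.2 x y h).2
  exact mu_lt_of_lt ((contains_iff_mem_keys' p y).mp h2) (mem_keys_of_get? h)
    (strLt_of_strLe_of_ne h1 hne)

theorem mu_le_size (p : PySem.Dict String String) (x : String) : mu p x ≤ p.size := by
  unfold mu
  rw [← keys_length]
  exact List.length_filter_le _ _

theorem rootN_none {p : PySem.Dict String String} {x : String} (h : p.get? x = none) (n : Nat) :
    rootN n p x = x := by cases n <;> simp [rootN, h]

theorem rootN_fix {p : PySem.Dict String String} {x : String} (h : p.get? x = some x) (n : Nat) :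
    rootN n p x = x := by cases n <;> simp [rootN, h]

theorem rootN_congr {p : PySem.Dict String String} (hInv : PInv p) :
    ∀ n m x, mu p x ≤ n → mu p x ≤ m → rootN n p x = rootN m p x := by
  intro n
  induction n with
  | zero =>
    intro m x hn _
    have hx : x ∉ p.keys := by
      intro hmem; have := mu_pos hmem; omega
    have : p.get? x = none := (PySem.Dict.get?_eq_none_iff_not_mem_keys p x).mpr hx
    rw [rootN_none this, rootN_none this]
  | succ n ih =>
    intro m x hn hm
    cases hg : p.get? x with
    | none => rw [rootN_none hg, rootN_none hg]
    | some y =>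
      by_cases hyx : y = x
      · subst hyx; rw [rootN_fix hg, rootN_fix hg]
      · have hmu : mu p y < mu p x := mu_lt hInv hg hyx
        have hx : x ∈ p.keys := mem_keys_of_get? hg
        have h1 : 1 ≤ mu p x := mu_pos hx
        cases m with
        | zero => omega
        | succ m' =>
          show rootN (n+1) p x = rootN (m'+1) p x
          simp only [rootN, hg, if_neg hyx]
          exact ih m' y (by omega) (by omega)

theorem root_unfold {p : PySem.Dict String String} (hInv : PInv p) (x : String) :
    root p x = match p.get? x with
    | none => x
    | some y => if y = x then x else root p y := by
  cases hg : p.get? x with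
  | none => simpa using rootN_none hg (p.size + 1)
  | some y =>
    simp only [hg]
    by_cases hyx : y = x
    · simp only [if_pos hyx]; subst hyx; exact rootN_fix hg _
    · simp only [if_neg hyx]
      show rootN (p.size + 1) p x = rootN (p.size + 1) p y
      have hmu : mu p y < mu p x := mu_lt hInv hg hyx
      have hx1 : 1 ≤ mu p x := mu_pos (mem_keys_of_get? hg)
      have hstep : rootN (p.size + 1) p x = rootN (mu p x) p x :=
        rootN_congr hInv _ _ x (by have := mu_le_size p x; omega) (le_refl _)
      obtain ⟨m, hm⟩ : ∃ m, mu p x = m + 1 := ⟨mu p x - 1, by omega⟩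
      rw [hstep, hm]
      simp only [rootN, hg, if_neg hyx]
      exact rootN_congr hInv m (p.size + 1) y (by omega) (by have := mu_le_size p y; omega)

theorem root_of_none {p : PySem.Dict String String} {x : String} (h : p.get? x = none) :
    root p x = x := rootN_none h _

theorem root_of_fix {p : PySem.Dict String String} {x : String} (h : p.get? x = some x) :
    root p x = x := rootN_fix h _

theorem root_step {p : PySem.Dict String String} (hInv : PInv p) {w u : String}
    (hg : p.get? w = some u) (huw : u ≠ w) : root p w = root p u := by
  have h := root_unfold hInv w
  rw [hg] at h
  simpa [huw] using h

-- strong-induction helper over mu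
theorem mu_rec {p : PySem.Dict String String} (P : String → Prop)
    (step : ∀ x, (∀ y, mu p y < mu p x → P y) → P x) : ∀ x, P x := by
  intro x
  have H : ∀ n x, mu p x ≤ n → P x := by
    intro n
    induction n with
    | zero => intro x h; exact step x (fun y hy => absurd hy (by omega))
    | succ n ih => intro x h; exact step x (fun y hy => ih y (by omega))
  exact H (mu p x) x (le_refl _)

theorem root_isRoot {p : PySem.Dict String String} (hInv : PInv p) :
    ∀ x, p.get? (root p x) = none ∨ p.get? (root p x) = some (root p x) := by
  apply mu_rec (p := p)
  intro x ih
  rw [root_unfold hInv]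
  cases hg : p.get? x with
  | none => left; exact hg
  | some y =>
    by_cases hyx : y = x
    · subst hyx; right; simpa using hg
    · simp only [if_neg hyx]
      exact ih y (mu_lt hInv hg hyx)

theorem root_contains {p : PySem.Dict String String} (hInv : PInv p) :
    ∀ x, p.contains x = true → p.contains (root p x) = true := by
  apply mu_rec (p := p)
  intro x ih hx
  rw [root_unfold hInv]
  cases hg : p.get? x with
  | none => exact hx
  | some y =>
    by_cases hyx : y = x
    · simpa [hyx] using hx
    · simp only [if_neg hyx]
      exact ih y (mu_lt hInv hg hyx) (hInv.2 x y hg).2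

theorem root_root {p : PySem.Dict String String} (hInv : PInv p) (x : String) :
    root p (root p x) = root p x := by
  rcases root_isRoot hInv x with h | h
  · exact root_of_none h
  · exact root_of_fix h

theorem get?_root_of_contains {p : PySem.Dict String String} (hInv : PInv p) {x : String}
    (hx : p.contains x = true) : p.get? (root p x) = some (root p x) := by
  rcases root_isRoot hInv x with h | h
  · exfalso
    have := root_contains hInv x hx
    rw [contains_iff_mem_keys'] at this
    exact ((PySem.Dict.get?_eq_none_iff_not_mem_keys p (root p x)).mp h) this
  · exact h

theorem contains_of_get? {p : PySem.Dict String String} {k v : String}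
    (h : p.get? k = some v) : p.contains k = true :=
  (contains_iff_mem_keys' p k).mpr (mem_keys_of_get? h)

-- path-compression insert parent[x] := parent[parent[x]] preserves the invariant and all roots
theorem PInv_insert_comp {p : PySem.Dict String String} (hInv : PInv p) {x y z : String}
    (hx : p.get? x = some y) (hz : p.get? y = some z) : PInv (p.insert x z) := by
  have hkeys : (p.insert x z).keys = p.keys :=
    PySem.Dict.keys_insert_of_contains p z (contains_of_get? hx)
  constructor
  · rw [hkeys]; exact hInv.1
  · intro k v hkv
    rw [PySem.Dict.get?_insert] at hkv
    by_cases hkx : k = x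
    · rw [if_pos hkx] at hkv
      cases hkv
      subst hkx
      refine ⟨strLe_trans (hInv.2 y z hz).1 (hInv.2 k y hx).1, ?_⟩
      rw [contains_iff_mem_keys', hkeys]
      exact (contains_iff_mem_keys' p z).mp (hInv.2 y z hz).2
    · rw [if_neg hkx] at hkv
      obtain ⟨h1, h2⟩ := hInv.2 k v hkv
      refine ⟨h1, ?_⟩
      rw [contains_iff_mem_keys', hkeys]
      exact (contains_iff_mem_keys' p v).mp h2

theorem root_insert_comp {p : PySem.Dict String String} (hInv : PInv p) {x y z : String}
    (hx : p.get? x = some y) (hyx : y ≠ x) (hz : p.get? y = some z) :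
    ∀ w, root (p.insert x z) w = root p w := by
  have hkeys : (p.insert x z).keys = p.keys :=
    PySem.Dict.keys_insert_of_contains p z (contains_of_get? hx)
  have hInv' : PInv (p.insert x z) := PInv_insert_comp hInv hx hz
  apply mu_rec (p := p)
  intro w ih
  by_cases hwx : w = x
  · subst hwx
    have hzw : z ≠ w := by
      intro he
      subst he
      have h1 : strLe z y = true := (hInv.2 y z hz).1
      have h2 : strLe y z = true := (hInv.2 z y hx).1
      have h3 : strLt y z = true := strLt_of_strLe_of_ne h2 hyx
      unfold strLe at h1; rw [h3] at h1; exact Bool.noConfusion h1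
    have hg' : (p.insert w z).get? w = some z := PySem.Dict.get?_insert_self p w z
    have e1 : root (p.insert w z) w = root (p.insert w z) z := root_step hInv' hg' hzw
    have hmuz : mu p z < mu p w := by
      have h1 : mu p z ≤ mu p y := mu_mono (hInv.2 y z hz).1
      have h2 : mu p y < mu p w := mu_lt hInv hx hyx
      omega
    rw [e1, ih z hmuz]
    have e2 : root p w = root p y := root_step hInv hx hyx
    by_cases hzy : z = y
    · subst hzy; exact e2.symm
    · have e3 : root p y = root p z := root_step hInv hz hzy
      rw [e2, e3]
  · have hgw : (p.insert x z).get? w = p.get? w := by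
      rw [PySem.Dict.get?_insert]; exact if_neg hwx
    cases hg : p.get? w with
    | none => rw [root_of_none (hgw.trans hg), root_of_none hg]
    | some u =>
      by_cases huw : u = w
      · subst huw; rw [root_of_fix (hgw.trans hg), root_of_fix hg]
      · have e1 : root (p.insert x z) w = root (p.insert x z) u := root_step hInv' (hgw.trans hg) huw
        have e2 : root p w = root p u := root_step hInv hg huw
        rw [e1, e2]; exact ih u (mu_lt hInv hg huw)

-- the union insert parent[hi] := lo (hi a root, lo a smaller root)
theorem PInv_insert_root {p : PySem.Dict String String} (hInv : PInv p) {x z : String}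
    (hx : p.get? x = some x) (hzk : p.contains z = true) (hzx : strLt z x = true) :
    PInv (p.insert x z) := by
  have hkeys : (p.insert x z).keys = p.keys :=
    PySem.Dict.keys_insert_of_contains p z (contains_of_get? hx)
  constructor
  · rw [hkeys]; exact hInv.1
  · intro k v hkv
    rw [PySem.Dict.get?_insert] at hkv
    by_cases hkx : k = x
    · rw [if_pos hkx] at hkv
      cases hkv
      subst hkx
      refine ⟨strLe_of_strLt hzx, ?_⟩
      rw [contains_iff_mem_keys', hkeys]
      exact (contains_iff_mem_keys' p z).mp hzk
    · rw [if_neg hkx] at hkv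
      obtain ⟨h1, h2⟩ := hInv.2 k v hkv
      refine ⟨h1, ?_⟩
      rw [contains_iff_mem_keys', hkeys]
      exact (contains_iff_mem_keys' p v).mp h2

theorem root_insert_root {p : PySem.Dict String String} (hInv : PInv p) {x z : String}
    (hx : p.get? x = some x) (hzk : p.contains z = true) (hzr : root p z = z)
    (hzx : strLt z x = true) :
    ∀ w, root (p.insert x z) w = if root p w = x then z else root p w := by
  have hInv' : PInv (p.insert x z) := PInv_insert_root hInv hx hzk hzx
  apply mu_rec (p := p)
  intro w ih
  by_cases hwx : w = x
  · subst hwx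
    have hzw : z ≠ w := ne_of_strLt hzx
    have hg' : (p.insert w z).get? w = some z := PySem.Dict.get?_insert_self p w z
    have e1 : root (p.insert w z) w = root (p.insert w z) z := root_step hInv' hg' hzw
    have hmuz : mu p z < mu p w :=
      mu_lt_of_lt ((contains_iff_mem_keys' p z).mp hzk) (mem_keys_of_get? hx) hzx
    rw [e1, ih z hmuz, hzr, root_of_fix hx]
    simp [hzw]
  · have hgw : (p.insert x z).get? w = p.get? w := by
      rw [PySem.Dict.get?_insert]; exact if_neg hwx
    cases hg : p.get? w with
    | none =>
      rw [root_of_none (hgw.trans hg), root_of_none hg, if_neg hwx]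
    | some u =>
      by_cases huw : u = w
      · subst huw
        rw [root_of_fix (hgw.trans hg), root_of_fix hg, if_neg hwx]
      · have e1 : root (p.insert x z) w = root (p.insert x z) u := root_step hInv' (hgw.trans hg) huw
        have e2 : root p w = root p u := root_step hInv hg huw
        rw [e1, e2]; exact ih u (mu_lt hInv hg huw)

-- a fresh self-loop insert (setdefault on a new key) preserves all roots
theorem not_mem_keys_of_not_contains {p : PySem.Dict String String} {x : String}
    (hx : p.contains x = false) : x ∉ p.keys := by
  intro hmem
  rw [(contains_iff_mem_keys' p x).mpr hmem] at hx
  exact Bool.noConfusion hx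

theorem PInv_insert_fresh {p : PySem.Dict String String} (hInv : PInv p) {x : String}
    (hx : p.contains x = false) : PInv (p.insert x x) := by
  have hkeys : (p.insert x x).keys = p.keys ++ [x] :=
    PySem.Dict.keys_insert_of_not_contains p x hx
  constructor
  · rw [hkeys]
    refine List.Nodup.append hInv.1 (List.nodup_singleton x) (fun a ha hb => ?_)
    rw [List.mem_singleton] at hb
    exact (not_mem_keys_of_not_contains hx) (hb ▸ ha)
  · intro k v hkv
    rw [PySem.Dict.get?_insert] at hkv
    by_cases hkx : k = x
    · rw [if_pos hkx] at hkv
      cases hkv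
      subst hkx
      exact ⟨strLe_refl k, PySem.Dict.contains_insert_self p k k⟩
    · rw [if_neg hkx] at hkv
      obtain ⟨h1, h2⟩ := hInv.2 k v hkv
      refine ⟨h1, ?_⟩
      rw [contains_iff_mem_keys', hkeys]
      exact List.mem_append_left _ ((contains_iff_mem_keys' p v).mp h2)

theorem root_insert_fresh {p : PySem.Dict String String} (hInv : PInv p) {x : String}
    (hx : p.contains x = false) : ∀ w, root (p.insert x x) w = root p w := by
  have hInv' : PInv (p.insert x x) := PInv_insert_fresh hInv hx
  apply mu_rec (p := p)
  intro w ih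
  by_cases hwx : w = x
  · subst hwx
    have hgn : p.get? w = none :=
      (PySem.Dict.get?_eq_none_iff_not_mem_keys p w).mpr (not_mem_keys_of_not_contains hx)
    rw [root_of_fix (PySem.Dict.get?_insert_self p w w), root_of_none hgn]
  · have hgw : (p.insert x x).get? w = p.get? w := by
      rw [PySem.Dict.get?_insert]; exact if_neg hwx
    cases hg : p.get? w with
    | none => rw [root_of_none (hgw.trans hg), root_of_none hg]
    | some u =>
      by_cases huw : u = w
      · subst huw; rw [root_of_fix (hgw.trans hg), root_of_fix hg]
      · have e1 : root (p.insert x x) w = root (p.insert x x) u := root_step hInv' (hgw.trans hg) huw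
        have e2 : root p w = root p u := root_step hInv hg huw
        rw [e1, e2]; exact ih u (mu_lt hInv hg huw)

-- A's find: returns the root, keeps the key set, preserves every root
theorem findLoopA_spec : ∀ (f : Nat) (p : PySem.Dict String String) (x : String),
    PInv p → p.contains x = true → mu p x ≤ f →
    (findLoopA f p x).2 = root p x ∧ PInv (findLoopA f p x).1 ∧
    (findLoopA f p x).1.keys = p.keys ∧ ∀ w, root (findLoopA f p x).1 w = root p w := by
  intro f
  induction f with
  | zero =>
    intro p x hInv hx hf
    exfalso
    have := mu_pos ((contains_iff_mem_keys' p x).mp hx)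
    omega
  | succ f ih =>
    intro p x hInv hx hf
    obtain ⟨y, hy⟩ := get?_eq_some_of_mem_keys ((contains_iff_mem_keys' p x).mp hx)
    have hgetD : p.getD x x = y := by rw [PySem.Dict.getD_eq_get?_getD, hy]; rfl
    by_cases hyx : y = x
    · have hdone : findLoopA (f + 1) p x = (p, x) := by
        simp [findLoopA, hgetD, hyx]
      rw [hdone]
      exact ⟨(root_of_fix (hyx ▸ hy)).symm, hInv, rfl, fun w => rfl⟩
    · obtain ⟨z, hz⟩ :=
        get?_eq_some_of_mem_keys ((contains_iff_mem_keys' p y).mp (hInv.2 x y hy).2)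
      have hgetDy : p.getD y y = z := by rw [PySem.Dict.getD_eq_get?_getD, hz]; rfl
      have hstep : findLoopA (f + 1) p x = findLoopA f (p.insert x z) z := by
        simp [findLoopA, hgetD, hyx, hgetDy]
      have hInv2 : PInv (p.insert x z) := PInv_insert_comp hInv hy hz
      have hkeys2 : (p.insert x z).keys = p.keys :=
        PySem.Dict.keys_insert_of_contains p z (contains_of_get? hy)
      have hroots2 := root_insert_comp hInv hy hyx hz
      have hcz : (p.insert x z).contains z = true := by
        rw [contains_iff_mem_keys', hkeys2]
        exact (contains_iff_mem_keys' p z).mp (hInv.2 y z hz).2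
      have hmu2 : mu (p.insert x z) z ≤ f := by
        have h1 : mu p z ≤ mu p y := mu_mono (hInv.2 y z hz).1
        have h2 : mu p y < mu p x := mu_lt hInv hy hyx
        rw [mu_congr_keys hkeys2]
        omega
      obtain ⟨r2, i2, k2, rr2⟩ := ih (p.insert x z) z hInv2 hcz hmu2
      have hxz : root p z = root p x := by
        have e1 : root p x = root p y := root_step hInv hy hyx
        by_cases hzy : z = y
        · subst hzy; exact e1.symm
        · exact ((root_step hInv hz hzy).symm.trans e1.symm : root p z = root p x)
      rw [hstep]
      refine ⟨by rw [r2, hroots2 z, hxz], i2, by rw [k2, hkeys2], fun w => by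
        rw [rr2 w, hroots2 w]⟩

theorem findA_spec (p : PySem.Dict String String) (x : String) (hInv : PInv p) :
    (findA p x).2 = root p x ∧ PInv (findA p x).1 ∧
    (∀ w, root (findA p x).1 w = root p w) ∧
    (∀ k, p.contains k = true → (findA p x).1.contains k = true) ∧
    (findA p x).1.contains x = true := by
  rw [show findA p x = findLoopA ((p.setdefault x x).size + 1) (p.setdefault x x) x from rfl]
  by_cases hc : p.contains x = true
  · rw [PySem.Dict.setdefault_of_contains p x hc]
    have hmu : mu p x ≤ p.size + 1 := by have := mu_le_size p x; omega
    obtain ⟨r, i, k, rr⟩ := findLoopA_spec (p.size + 1) p x hInv hc hmu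
    refine ⟨r, i, rr, fun k' hk' => ?_, ?_⟩
    · rw [contains_iff_mem_keys', k]
      exact (contains_iff_mem_keys' p k').mp hk'
    · rw [contains_iff_mem_keys', k]
      exact (contains_iff_mem_keys' p x).mp hc
  · have hc' : p.contains x = false := by
      cases h : p.contains x
      · rfl
      · exact absurd h hc
    rw [PySem.Dict.setdefault_of_not_contains p x hc']
    have hInvq : PInv (p.insert x x) := PInv_insert_fresh hInv hc'
    have hrootsq := root_insert_fresh hInv hc'
    have hcq : (p.insert x x).contains x = true := PySem.Dict.contains_insert_self p x x
    have hkq : (p.insert x x).keys = p.keys ++ [x] :=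
      PySem.Dict.keys_insert_of_not_contains p x hc'
    have hmu : mu (p.insert x x) x ≤ (p.insert x x).size + 1 := by
      have := mu_le_size (p.insert x x) x; omega
    obtain ⟨r, i, k, rr⟩ := findLoopA_spec ((p.insert x x).size + 1) (p.insert x x) x hInvq hcq hmu
    refine ⟨by rw [r, hrootsq x], i, fun w => by rw [rr w, hrootsq w], fun k' hk' => ?_, ?_⟩
    · rw [contains_iff_mem_keys', k, hkq]
      exact List.mem_append_left _ ((contains_iff_mem_keys' p k').mp hk')
    · rw [contains_iff_mem_keys', k, hkq]
      exact List.mem_append_right _ (List.mem_singleton_self x)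

-- A's union: afterwards every root equal to the larger of the two class roots reads the smaller
theorem unionA_spec (p : PySem.Dict String String) (a b : String) (hInv : PInv p) :
    PInv (unionA p a b) ∧
    (∀ k, p.contains k = true → (unionA p a b).contains k = true) ∧
    ∀ w, root (unionA p a b) w =
      (if root p w = (if strLe (root p a) (root p b) then root p b else root p a)
       then (if strLe (root p a) (root p b) then root p a else root p b)
       else root p w) := by
  obtain ⟨ra2, ia, rra, ca, cxa⟩ := findA_spec p a hInv
  obtain ⟨rb2, ib, rrb, cb, cxb⟩ := findA_spec (findA p a).1 b ia
  have hra : (findA p a).2 = root p a := ra2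
  have hrb : (findA (findA p a).1 b).2 = root p b := by rw [rb2, rra b]
  have hroots2 : ∀ w, root (findA (findA p a).1 b).1 w = root p w := fun w => by
    rw [rrb w, rra w]
  have hunfold : unionA p a b =
      (if (findA p a).2 ≠ (findA (findA p a).1 b).2 then
        (if strLt (findA p a).2 (findA (findA p a).1 b).2 then
          (findA (findA p a).1 b).1.insert (findA (findA p a).1 b).2 (findA p a).2
        else (findA (findA p a).1 b).1.insert (findA p a).2 (findA (findA p a).1 b).2)
      else (findA (findA p a).1 b).1) := rfl
  by_cases hne : root p a = root p b
  · have hcond : ¬ (findA p a).2 ≠ (findA (findA p a).1 b).2 := by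
      rw [hra, hrb]; simp [hne]
    rw [hunfold, if_neg hcond]
    refine ⟨ib, fun k hk => cb k (ca k hk), fun w => ?_⟩
    rw [hroots2 w, ← hne]
    by_cases h : root p w = (if strLe (root p a) (root p a) then root p a else root p a)
    · simp only [if_pos h]
      simpa using h
    · simp only [if_neg h]
  · have hcond : (findA p a).2 ≠ (findA (findA p a).1 b).2 := by
      rw [hra, hrb]; exact hne
    rw [hunfold, if_pos hcond]
    -- the roots ra, rb are self-rooted keys of the current parent dict
    have hcb2a : (findA (findA p a).1 b).1.contains a = true := cb a cxa
    have hga : (findA (findA p a).1 b).1.get? (root p a) = some (root p a) := by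
      have h1 : root (findA (findA p a).1 b).1 a = root p a := hroots2 a
      have := get?_root_of_contains ib (x := a) hcb2a
      rw [h1] at this
      exact this
    have hgb : (findA (findA p a).1 b).1.get? (root p b) = some (root p b) := by
      have h1 : root (findA (findA p a).1 b).1 b = root p b := hroots2 b
      have := get?_root_of_contains ib (x := b) cxb
      rw [h1] at this
      exact this
    have hcra : (findA (findA p a).1 b).1.contains (root p a) = true := contains_of_get? hga
    have hcrb : (findA (findA p a).1 b).1.contains (root p b) = true := contains_of_get? hgb
    have hrra : root (findA (findA p a).1 b).1 (root p a) = root p a := by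
      rw [hroots2 (root p a)]
      exact root_root hInv a
    have hrrb : root (findA (findA p a).1 b).1 (root p b) = root p b := by
      rw [hroots2 (root p b)]
      exact root_root hInv b
    by_cases hlt : strLt (root p a) (root p b) = true
    · have hle : strLe (root p a) (root p b) = true := strLe_of_strLt hlt
      rw [hra, hrb, if_pos hlt]
      have hq := root_insert_root ib hgb hcra hrra hlt
      have hiq := PInv_insert_root ib hgb hcra hlt
      refine ⟨hiq, fun k hk => ?_, fun w => ?_⟩
      · have hkeysq := PySem.Dict.keys_insert_of_contains
          (findA (findA p a).1 b).1 (root p a) (contains_of_get? hgb)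
        rw [contains_iff_mem_keys', hkeysq]
        exact (contains_iff_mem_keys' _ k).mp (cb k (ca k hk))
      · rw [hq w, hroots2 w]
        simp [hle]
    · have hlt' : strLt (root p b) (root p a) = true := by
        rcases strLt_total hne with h | h
        · exact absurd h hlt
        · exact h
      have hle' : strLe (root p a) (root p b) = false := by
        unfold strLe; rw [hlt']; rfl
      have hltf : strLt (root p a) (root p b) = false := by
        cases h : strLt (root p a) (root p b)
        · rfl
        · exact absurd h hlt
      rw [hra, hrb, hltf]
      simp only [Bool.false_eq_true, if_false]
      have hq := root_insert_root ib hga hcrb hrrb hlt'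
      have hiq := PInv_insert_root ib hga hcrb hlt'
      refine ⟨hiq, fun k hk => ?_, fun w => ?_⟩
      · have hkeysq := PySem.Dict.keys_insert_of_contains
          (findA (findA p a).1 b).1 (root p b) (contains_of_get? hga)
        rw [contains_iff_mem_keys', hkeysq]
        exact (contains_iff_mem_keys' _ k).mp (cb k (ca k hk))
      · rw [hq w, hroots2 w]
        simp [hle']

-- ---- B's label map ----
def LInv (l : PySem.Dict String String) : Prop :=
  l.keys.Nodup ∧ ∀ k v, l.get? k = some v → l.contains v = true

theorem get?_mapVal (f : String → String) (items : List (String × String)) (k : String) :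
    (PySem.Dict.mk (items.map (fun kv => (kv.1, f kv.2)))).get? k
      = ((PySem.Dict.mk items).get? k).map f := by
  induction items with
  | nil => rfl
  | cons kv rest ih =>
    obtain ⟨k1, v1⟩ := kv
    simp only [List.map_cons, PySem.Dict.get?_mk_cons]
    by_cases h : (k1 == k) = true
    · rw [if_pos h, if_pos h]; rfl
    · rw [if_neg h, if_neg h]; exact ih

theorem keys_mapVal (f : String → String) (items : List (String × String)) :
    (PySem.Dict.mk (items.map (fun kv => (kv.1, f kv.2)))).keys
      = (PySem.Dict.mk items).keys := by
  simp only [PySem.Dict.keys]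
  rw [List.map_map]
  rfl

-- one flooding step: every label equal to hi becomes lo, a and b read lo
theorem stepB_spec (l : PySem.Dict String String) (hL : LInv l) (a b : String) :
    LInv (stepB l a b) ∧ ∀ w, (stepB l a b).getD w w =
      (if l.getD w w = (if strLe (l.getD a a) (l.getD b b) then l.getD b b else l.getD a a)
       then (if strLe (l.getD a a) (l.getD b b) then l.getD a a else l.getD b b)
       else l.getD w w) := by
  have hs : stepB l a b =
      ((PySem.Dict.mk (l.items.map (fun kv =>
          (kv.1, if kv.2 = (if strLe (l.getD a a) (l.getD b b) then l.getD b b else l.getD a a)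
                 then (if strLe (l.getD a a) (l.getD b b) then l.getD a a else l.getD b b)
                 else kv.2)))).insert a
        (if strLe (l.getD a a) (l.getD b b) then l.getD a a else l.getD b b)).insert b
        (if strLe (l.getD a a) (l.getD b b) then l.getD a a else l.getD b b) := rfl
  generalize hlo : (if strLe (l.getD a a) (l.getD b b) then l.getD a a else l.getD b b) = lo
    at hs ⊢
  generalize hhi : (if strLe (l.getD a a) (l.getD b b) then l.getD b b else l.getD a a) = hi
    at hs ⊢
  have hP : ∀ k, (PySem.Dict.mk (l.items.map (fun kv =>
      (kv.1, if kv.2 = hi then lo else kv.2)))).get? k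
      = (l.get? k).map (fun v => if v = hi then lo else v) := by
    intro k
    rw [get?_mapVal (fun v => if v = hi then lo else v) l.items k]
  have hPkeys : (PySem.Dict.mk (l.items.map (fun kv =>
      (kv.1, if kv.2 = hi then lo else kv.2)))).keys = l.keys := by
    rw [keys_mapVal (fun v => if v = hi then lo else v) l.items]
  have hg : ∀ k, (stepB l a b).get? k =
      (if k = b then some lo else if k = a then some lo
       else (l.get? k).map (fun v => if v = hi then lo else v)) := by
    intro k
    rw [hs, PySem.Dict.get?_insert, PySem.Dict.get?_insert]
    by_cases h1 : k = b
    · rw [if_pos h1, if_pos h1]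
    · rw [if_neg h1, if_neg h1]
      by_cases h2 : k = a
      · rw [if_pos h2, if_pos h2]
      · rw [if_neg h2, if_neg h2, hP k]
  have hmem : ∀ z, (stepB l a b).contains z = true ↔ (z = b ∨ z = a ∨ z ∈ l.keys) := by
    intro z
    rw [contains_iff_mem_keys', hs, PySem.Dict.mem_keys_insert, PySem.Dict.mem_keys_insert,
      hPkeys]
  have hlo_mem : (stepB l a b).contains lo = true := by
    rw [hmem lo]
    by_cases hc : strLe (l.getD a a) (l.getD b b) = true
    · rw [if_pos hc] at hlo
      cases ha : l.get? a with
      | none =>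
        right; left
        rw [← hlo, PySem.Dict.getD_of_get?_eq_none l a ha]
      | some va =>
        right; right
        rw [← hlo, PySem.Dict.getD_of_get?_eq_some l a ha]
        exact (contains_iff_mem_keys' l va).mp (hL.2 a va ha)
    · rw [if_neg hc] at hlo
      cases hb : l.get? b with
      | none =>
        left
        rw [← hlo, PySem.Dict.getD_of_get?_eq_none l b hb]
      | some vb =>
        right; right
        rw [← hlo, PySem.Dict.getD_of_get?_eq_some l b hb]
        exact (contains_iff_mem_keys' l vb).mp (hL.2 b vb hb)
  have hhi_ne : ∀ w, l.get? w = none → w ≠ a → w ≠ b → w ≠ hi := by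
    intro w hw hwa hwb he
    have hwk : w ∉ l.keys := (PySem.Dict.get?_eq_none_iff_not_mem_keys l w).mp hw
    by_cases hc : strLe (l.getD a a) (l.getD b b) = true
    · rw [if_pos hc] at hhi
      cases hb : l.get? b with
      | none =>
        rw [PySem.Dict.getD_of_get?_eq_none l b hb] at hhi
        exact hwb (he.trans hhi.symm)
      | some vb =>
        rw [PySem.Dict.getD_of_get?_eq_some l b hb] at hhi
        have hcv : l.contains vb = true := hL.2 b vb hb
        rw [hhi.trans he.symm] at hcv
        exact hwk ((contains_iff_mem_keys' l w).mp hcv)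
    · rw [if_neg hc] at hhi
      cases ha : l.get? a with
      | none =>
        rw [PySem.Dict.getD_of_get?_eq_none l a ha] at hhi
        exact hwa (he.trans hhi.symm)
      | some va =>
        rw [PySem.Dict.getD_of_get?_eq_some l a ha] at hhi
        have hcv : l.contains va = true := hL.2 a va ha
        rw [hhi.trans he.symm] at hcv
        exact hwk ((contains_iff_mem_keys' l w).mp hcv)
  constructor
  · constructor
    · rw [hs]
      apply PySem.Dict.nodup_keys_insert
      apply PySem.Dict.nodup_keys_insert
      rw [hPkeys]
      exact hL.1
    · intro k v hkv
      rw [hg k] at hkv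
      by_cases h1 : k = b
      · rw [if_pos h1] at hkv; cases hkv; exact hlo_mem
      · rw [if_neg h1] at hkv
        by_cases h2 : k = a
        · rw [if_pos h2] at hkv; cases hkv; exact hlo_mem
        · rw [if_neg h2] at hkv
          cases hk : l.get? k with
          | none => rw [hk] at hkv; cases hkv
          | some u =>
            rw [hk] at hkv
            cases hkv
            show (stepB l a b).contains (if u = hi then lo else u) = true
            by_cases hu : u = hi
            · rw [if_pos hu]; exact hlo_mem
            · rw [if_neg hu, hmem]
              right; right
              exact (contains_iff_mem_keys' l u).mp (hL.2 k u hk)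
  · intro w
    rw [PySem.Dict.getD_eq_get?_getD, hg w]
    by_cases h1 : w = b
    · rw [if_pos h1, h1]
      simp only [Option.getD_some]
      by_cases hc : strLe (l.getD a a) (l.getD b b) = true
      · rw [if_pos hc] at hlo hhi
        rw [hhi]
        simp
      · rw [if_neg hc] at hlo hhi
        rw [hlo]
        simp
    · rw [if_neg h1]
      by_cases h2 : w = a
      · rw [if_pos h2, h2]
        simp only [Option.getD_some]
        by_cases hc : strLe (l.getD a a) (l.getD b b) = true
        · rw [if_pos hc] at hlo hhi
          rw [hlo]
          simp
        · rw [if_neg hc] at hlo hhi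
          rw [hhi]
          simp
      · rw [if_neg h2]
        cases hw : l.get? w with
        | some u =>
          have hDw : l.getD w w = u := PySem.Dict.getD_of_get?_eq_some l w hw
          rw [hDw]
          simp only [Option.map_some, Option.getD_some]
        | none =>
          have hDw : l.getD w w = w := PySem.Dict.getD_of_get?_eq_none l w hw
          rw [hDw]
          simp only [Option.map_none, Option.getD_none]
          rw [if_neg (hhi_ne w hw h2 h1)]

-- ---- the folds ----
theorem PInv_empty : PInv (PySem.Dict.empty : PySem.Dict String String) := by
  constructor
  · rw [PySem.Dict.keys_empty]; exact List.nodup_nil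
  · intro k v h
    rw [PySem.Dict.get?_empty] at h
    cases h

theorem LInv_empty : LInv (PySem.Dict.empty : PySem.Dict String String) := by
  constructor
  · rw [PySem.Dict.keys_empty]; exact List.nodup_nil
  · intro k v h
    rw [PySem.Dict.get?_empty] at h
    cases h

theorem root_empty (w : String) : root (PySem.Dict.empty : PySem.Dict String String) w = w :=
  root_of_none (PySem.Dict.get?_empty w)

theorem initLoop : ∀ (ds : List (List (String × String))) (p : PySem.Dict String String),
    PInv p →
    PInv (ds.foldl (fun p s => (findA p (sGet s "device_id")).1) p) ∧
    ∀ w, root (ds.foldl (fun p s => (findA p (sGet s "device_id")).1) p) w = root p w := by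
  intro ds
  induction ds with
  | nil => intro p h; exact ⟨h, fun _ => rfl⟩
  | cons s ds ih =>
    intro p h
    obtain ⟨_, i, rr, _, _⟩ := findA_spec p (sGet s "device_id") h
    obtain ⟨i2, rr2⟩ := ih (findA p (sGet s "device_id")).1 i
    simp only [List.foldl_cons]
    exact ⟨i2, fun w => by rw [rr2 w, rr w]⟩

theorem linksLoop : ∀ (links : List (String × String)) (p l : PySem.Dict String String),
    PInv p → LInv l → (∀ w, root p w = l.getD w w) →
    PInv (links.foldl (fun p ab => unionA p ab.1 ab.2) p) ∧
    LInv (links.foldl (fun l ab => stepB l ab.1 ab.2) l) ∧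
    ∀ w, root (links.foldl (fun p ab => unionA p ab.1 ab.2) p) w
        = (links.foldl (fun l ab => stepB l ab.1 ab.2) l).getD w w := by
  intro links
  induction links with
  | nil => intro p l hp hl hs; exact ⟨hp, hl, hs⟩
  | cons ab links ih =>
    intro p l hp hl hs
    obtain ⟨ip, _, rp⟩ := unionA_spec p ab.1 ab.2 hp
    obtain ⟨il, rl⟩ := stepB_spec l hl ab.1 ab.2
    have hsim : ∀ w, root (unionA p ab.1 ab.2) w = (stepB l ab.1 ab.2).getD w w := by
      intro w
      rw [rp w, rl w, hs w, hs ab.1, hs ab.2]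
    simp only [List.foldl_cons]
    exact ih (unionA p ab.1 ab.2) (stepB l ab.1 ab.2) ip il hsim

theorem finalLoop (lab : PySem.Dict String String) :
    ∀ (ds : List (List (String × String))) (p : PySem.Dict String String)
      (acc : List (List (String × String))),
    PInv p → (∀ w, root p w = lab.getD w w) →
    (ds.foldl
      (fun (st : PySem.Dict String String × List (List (String × String))) s =>
        let fr := findA st.1 (sGet s "device_id")
        (fr.1, st.2 ++ [[("session_id", sGet s "session_id"), ("device_id", sGet s "device_id"),
                         ("canonical_id", fr.2)]]))
      (p, acc)).2
    = acc ++ ds.map (fun s =>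
        [("session_id", sGet s "session_id"), ("device_id", sGet s "device_id"),
         ("canonical_id", lab.getD (sGet s "device_id") (sGet s "device_id"))]) := by
  intro ds
  induction ds with
  | nil => intro p acc _ _; simp
  | cons s ds ih =>
    intro p acc hInv hR
    obtain ⟨r, i, rr, _, _⟩ := findA_spec p (sGet s "device_id") hInv
    simp only [List.foldl_cons, List.map_cons]
    rw [ih (findA p (sGet s "device_id")).1
      (acc ++ [[("session_id", sGet s "session_id"), ("device_id", sGet s "device_id"),
                ("canonical_id", (findA p (sGet s "device_id")).2)]])
      i (fun w => by rw [rr w, hR w])]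
    rw [r, hR (sGet s "device_id")]
    simp

-- ===== VERDICT (by name: the statement is the Claim_ definition above) =====
theorem stitch_sessions_spec : Claim_equal_stitch_sessions := by
  unfold Claim_equal_stitch_sessions
  intro ds links _ _
  unfold Spec_stitch_sessions
  have h0 := initLoop ds PySem.Dict.empty PInv_empty
  have hr0 : ∀ w, root (ds.foldl (fun p s => (findA p (sGet s "device_id")).1)
      PySem.Dict.empty) w = PySem.Dict.empty.getD w w := fun w => by
    rw [h0.2 w, root_empty w, PySem.Dict.getD_empty]
  obtain ⟨hI1, hL1, hr1⟩ := linksLoop links _ _ h0.1 LInv_empty hr0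
  have hfin := finalLoop _ ds _ [] hI1 hr1
  exact hfin.trans (by rw [List.nil_append]; rfl)
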